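-- pv_equiv track=rewrite | github.com/DivineJK/MyPythonLibrary | DynamicProgramming/RestrictedPermutation.py | countRestrictedPermutationString
-- ===== SOURCE A (Python) =====
-- def countRestrictedPermutation(cond, m = int(1e9)+7):
--     n = len(cond) + 1
--     dp = [1]*(n+1)
--     dp[0] = 0
--     dp_prev = [1]*(n+1)
--     dp_prev[0] = 0
--     for i in range(2, n+1):
--         for j in range(1, i+1):
--             if cond[i-2] == -1:
--                 dp[j] = (dp[j-1] + dp_prev[j-1]) % m
--             elif cond[i-2] == 1:
--                 dp[j] = (dp[j-1] + dp_prev[i-1] - dp_prev[j-1]) % m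
--             else:
--                 dp[j] = (dp[j-1] + dp_prev[i-1]) % m
--             dp_prev[j-1] = dp[j-1]
--         dp_prev[i] = dp[i]
--         for j in range(i+1, n+1):
--             dp[j] = dp[j-1]
--             dp_prev[j] = dp[j]
--     return dp[n]
--
-- def countRestrictedPermutationString(s, m = int(1e9) + 7):
--     n = len(s)
--     cond = [0]*n
--     for i in range(n):
--         if s[i] == '<':
--             cond[i] = -1
--         elif s[i] == '=':
--             cond[i] = 0
--         else:
--             cond[i] = 1
--     return countRestrictedPermutation(cond, m)
-- ===== SOURCE B (Python) =====
-- def countRestrictedPermutationString(s, m=10**9 + 7):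
--     # Backward (adjoint) pass: propagate a shrinking covector of completion
--     # weights from the END of the string; each step applies the transpose of
--     # the forward insertion step (strict suffix sums for '<', prefix sums for
--     # the '>' case, a constant total for '='), and w[0] is the answer.
--     if not s:
--         return 1
--     w = [1] * (len(s) + 1)
--     for c in reversed(s):
--         if c == '<':
--             nxt = []
--             acc = 0
--             for x in reversed(w[1:]):
--                 acc = (acc + x) % m
--                 nxt.append(acc)
--             nxt.reverse()
--         elif c == '=':
--             t = 0
--             for x in w:
--                 t = (t + x) % m
--             nxt = [t] * (len(w) - 1)
--         else:
--             nxt = []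
--             acc = 0
--             for x in w[:-1]:
--                 acc = (acc + x) % m
--                 nxt.append(acc)
--         w = nxt
--     return w[0]
-- ===== Notes on version B (the rewrite author's own statement) =====
-- stated objective: alternative
-- what changed: A runs the DP forward, growing a rank-indexed row per character with in-place index juggling over two padded length-(n+1) arrays plus a tail-copy loop; B scans the string BACKWARD, propagating a shrinking covector of completion weights with the transposed updates (strict suffix sums for '<', prefix sums for '>', a constant total for '='), and reads the answer off as the single remaining entry.
-- outside the precondition, e.g. on countRestrictedPermutationString('<', 0): A raises ZeroDivisionError, B raises ZeroDivisionError
import Mathlib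
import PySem

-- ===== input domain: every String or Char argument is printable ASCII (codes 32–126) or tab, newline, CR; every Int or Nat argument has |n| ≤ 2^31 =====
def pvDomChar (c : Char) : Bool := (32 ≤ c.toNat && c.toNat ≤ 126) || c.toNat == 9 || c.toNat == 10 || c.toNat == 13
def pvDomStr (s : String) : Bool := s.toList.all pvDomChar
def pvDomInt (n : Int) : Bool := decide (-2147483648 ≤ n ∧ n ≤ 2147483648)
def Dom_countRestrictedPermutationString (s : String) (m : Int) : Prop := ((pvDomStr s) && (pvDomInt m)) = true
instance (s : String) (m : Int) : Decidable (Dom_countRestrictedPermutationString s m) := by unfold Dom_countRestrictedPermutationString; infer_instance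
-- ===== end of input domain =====

-- B runs the DP backward: it propagates a shrinking covector of completion weights
-- from the end of the string (transposed updates), instead of A's forward growing
-- rank table with in-place index juggling (objective: alternative).

-- ===== PORT A =====
-- literal port of countRestrictedPermutation (all list indices are in range, so
-- pyGetD/pySetD are exact here); the two nested loop bodies are the named
-- helpers pvInner/pvCopy, the outer loop body is pvOuter
-- A's inner loop body (the body of the inner for-loop)
def pvInner (cond : List Int) (m : Int) (i : Int) (st : List Int × List Int) (j : Int) :
    List Int × List Int :=
  let dp := st.1
  let dp_prev := st.2
  let dp :=
    if PySem.List.pyGetD cond (i - 2) 0 = -1 then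
      PySem.List.pySetD dp j
        (PySem.Int.mod (PySem.List.pyGetD dp (j - 1) 0 + PySem.List.pyGetD dp_prev (j - 1) 0) m)
    else if PySem.List.pyGetD cond (i - 2) 0 = 1 then
      PySem.List.pySetD dp j
        (PySem.Int.mod (PySem.List.pyGetD dp (j - 1) 0 + PySem.List.pyGetD dp_prev (i - 1) 0
          - PySem.List.pyGetD dp_prev (j - 1) 0) m)
    else
      PySem.List.pySetD dp j
        (PySem.Int.mod (PySem.List.pyGetD dp (j - 1) 0 + PySem.List.pyGetD dp_prev (i - 1) 0) m)
  let dp_prev := PySem.List.pySetD dp_prev (j - 1) (PySem.List.pyGetD dp (j - 1) 0)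
  (dp, dp_prev)

-- A's tail-copy loop body
def pvCopy (st : List Int × List Int) (j : Int) : List Int × List Int :=
  let dp := PySem.List.pySetD st.1 j (PySem.List.pyGetD st.1 (j - 1) 0)
  let dp_prev := PySem.List.pySetD st.2 j (PySem.List.pyGetD dp j 0)
  (dp, dp_prev)

-- A's outer loop body
def pvOuter (cond : List Int) (m n : Int) (st : List Int × List Int) (i : Int) :
    List Int × List Int :=
  let st := (PySem.List.pyRange 1 (i + 1) 1).foldl (pvInner cond m i) st
  let dp := st.1
  let dp_prev := PySem.List.pySetD st.2 i (PySem.List.pyGetD dp i 0)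
  (PySem.List.pyRange (i + 1) (n + 1) 1).foldl pvCopy (dp, dp_prev)

def countRestrictedPermutation (cond : List Int) (m : Int) : Int :=
  let n : Int := (cond.length : Int) + 1
  let dp : List Int := (List.replicate (n + 1).toNat 1).set 0 0
  let dp_prev : List Int := (List.replicate (n + 1).toNat 1).set 0 0
  let st := (PySem.List.pyRange 2 (n + 1) 1).foldl (pvOuter cond m n) (dp, dp_prev)
  PySem.List.pyGetD st.1 n 0

def countRestrictedPermutationString (s : String) (m : Int) : Int :=
  let n : Int := PySem.Str.len s
  let cond : List Int :=
    (PySem.List.pyRange 0 n 1).foldl (fun (cond : List Int) i =>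
      if PySem.Str.pyGet? s i = some '<' then PySem.List.pySetD cond i (-1)
      else if PySem.Str.pyGet? s i = some '=' then PySem.List.pySetD cond i 0
      else PySem.List.pySetD cond i 1) (List.replicate n.toNat 0)
  countRestrictedPermutation cond m

-- ===== PORT B =====
-- backward (adjoint) pass of Source B: a shrinking weight vector scanned from the
-- right; 'for x in reversed(w[1:])' etc. are folds over the PySem slices
def countRestrictedPermutationString_alt (s : String) (m : Int) : Int :=
  let cs := s.toList
  if cs.isEmpty then 1
  else
    let w0 : List Int := List.replicate (cs.length + 1) 1
    let w := cs.reverse.foldl (fun (w : List Int) c =>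
      if c = '<' then
        (((PySem.List.slice w (some 1) none).reverse).foldl
          (fun (pa : List Int × Int) x =>
            (pa.1 ++ [PySem.Int.mod (pa.2 + x) m], PySem.Int.mod (pa.2 + x) m))
          ([], 0)).1.reverse
      else if c = '=' then
        List.replicate (w.length - 1) (w.foldl (fun t x => PySem.Int.mod (t + x) m) 0)
      else
        ((PySem.List.slice w none (some (-1))).foldl
          (fun (pa : List Int × Int) x =>
            (pa.1 ++ [PySem.Int.mod (pa.2 + x) m], PySem.Int.mod (pa.2 + x) m))
          ([], 0)).1) w0
    PySem.List.pyGetD w 0 0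

-- ===== PRECONDITION & SPEC =====
-- Pre_ excludes exactly the inputs where A raises ZeroDivisionError (m = 0 with a
-- nonempty string reaches '% m'); B's own '% m' raises there too.
def Pre_countRestrictedPermutationString (s : String) (m : Int) : Prop := s = "" ∨ m ≠ 0
instance (s : String) (m : Int) : Decidable (Pre_countRestrictedPermutationString s m) := by
  unfold Pre_countRestrictedPermutationString; infer_instance

def pvWitness_countRestrictedPermutationString : String × Int := ("<>=<", 1000000007)

def Spec_countRestrictedPermutationString (s : String) (m : Int) (out : Int) : Prop := out = countRestrictedPermutationString_alt s m
instance (s : String) (m : Int) (out : Int) : Decidable (Spec_countRestrictedPermutationString s m out) := by unfold Spec_countRestrictedPermutationString; infer_instance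

-- ===== CLAIM (what is proved, stated in full; the proofs are below) =====
def Claim_equal_countRestrictedPermutationString : Prop := ∀ (s : String) (m : Int), Dom_countRestrictedPermutationString s m → Pre_countRestrictedPermutationString s m → Spec_countRestrictedPermutationString s m (countRestrictedPermutationString s m)


-- ===== LEMMAS AND PROOFS =====

-- character code, as A's cond array assigns it
def pvCh (c : Char) : Int := if c = '<' then -1 else if c = '=' then 0 else 1

-- reduced prefix-sum scan: returns (list of reduced prefix sums, final accumulator)
def pvScan (m : Int) (acc : Int) : List Int → List Int × Int
  | [] => ([], acc)
  | v :: vs =>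
      (PySem.Int.mod (acc + v) m :: (pvScan m (PySem.Int.mod (acc + v) m) vs).1,
       (pvScan m (PySem.Int.mod (acc + v) m) vs).2)

-- forward row step of A's DP, expressed through pvScan
def pvBstep (m : Int) (cnt : List Int) (c : Char) : List Int :=
  if c = '<' then 0 :: (pvScan m 0 cnt).1
  else if c = '=' then List.replicate ((0 :: (pvScan m 0 cnt).1).length) (pvScan m 0 cnt).2
  else (0 :: (pvScan m 0 cnt).1).map (fun p => PySem.Int.mod ((pvScan m 0 cnt).2 - p) m)

-- forward row after the first K characters
def pvR (m : Int) (cs : List Char) (K : Nat) : List Int := (cs.take K).foldl (pvBstep m) [1]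

-- closed form of A's dp (= dp_prev) array after the outer iterations i = 2 .. K+1
def pvDD (m : Int) (cs : List Char) (K : Nat) : List Int :=
  if K = 0 then 0 :: List.replicate (cs.length + 1) 1
  else 0 :: ((pvScan m 0 (pvR m cs K)).1
         ++ List.replicate (cs.length - K) (pvScan m 0 (pvR m cs K)).2)

-- the list of raw increments A adds in outer iteration i = K+2, read off the array D
def pvTL (_m : Int) (D : List Int) (c : Int) (len kp1 : Nat) : List Int :=
  (List.range len).map (fun u =>
    if c = -1 then D.getD u 0
    else if c = 1 then D.getD kp1 0 - D.getD u 0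
    else D.getD kp1 0)

-- state of A's inner loop after t iterations
def pvSt (m : Int) (tl tail : List Int) (t : Nat) : List Int :=
  0 :: ((pvScan m 0 (tl.take t)).1 ++ tail.drop t)

-- ---- modular-congruence toolkit ----
theorem pvModCong_iff (a b m : Int) :
    PySem.Int.mod a m = PySem.Int.mod b m ↔ m ∣ (a - b) := by
  simp only [PySem.Int.mod]
  rw [Int.fmod_eq_fmod_iff_fmod_sub_eq_zero, ← Int.dvd_iff_fmod_eq_zero]

theorem pvMod_mod (a m : Int) : PySem.Int.mod (PySem.Int.mod a m) m = PySem.Int.mod a m := by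
  simp [PySem.Int.mod]

theorem pvMod_addL (a b m : Int) :
    PySem.Int.mod (PySem.Int.mod a m + b) m = PySem.Int.mod (a + b) m := by
  simp [PySem.Int.mod, Int.fmod_add_fmod]

-- ---- pvScan facts ----
theorem pvScan_length (m acc : Int) (l : List Int) : (pvScan m acc l).1.length = l.length := by
  induction l generalizing acc with
  | nil => rfl
  | cons v vs ih => simp [pvScan, ih]

theorem pvScan_append (m acc : Int) (l1 l2 : List Int) :
    pvScan m acc (l1 ++ l2) =
      ((pvScan m acc l1).1 ++ (pvScan m (pvScan m acc l1).2 l2).1,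
       (pvScan m (pvScan m acc l1).2 l2).2) := by
  induction l1 generalizing acc with
  | nil => rfl
  | cons v vs ih => simp [pvScan, ih]

theorem pvScan_foldl (m : Int) (l p : List Int) (acc : Int) :
    l.foldl (fun (pa : List Int × Int) v =>
        (pa.1 ++ [PySem.Int.mod (pa.2 + v) m], PySem.Int.mod (pa.2 + v) m)) (p, acc)
      = (p ++ (pvScan m acc l).1, (pvScan m acc l).2) := by
  induction l generalizing p acc with
  | nil => simp [pvScan]
  | cons v vs ih => simp [pvScan, ih]

theorem pvScan_congr (m : Int) :
    ∀ (l l' : List Int), List.Forall₂ (fun a b => PySem.Int.mod a m = PySem.Int.mod b m) l l' →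
    ∀ acc, pvScan m acc l = pvScan m acc l' := by
  intro l l' h
  induction h with
  | nil => intro acc; rfl
  | @cons a b l1 l2 hab htl ih =>
    intro acc
    have h2 : PySem.Int.mod (acc + a) m = PySem.Int.mod (acc + b) m := by
      rw [pvModCong_iff] at hab ⊢
      have : acc + a - (acc + b) = a - b := by ring
      rw [this]; exact hab
    simp [pvScan, h2, ih]

theorem pvScan_acc (m : Int) (l : List Int) :
    ∀ a, (pvScan m (PySem.Int.mod a m) l).2 = PySem.Int.mod (a + l.sum) m := by
  induction l with
  | nil => intro a; simp [pvScan]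
  | cons v vs ih =>
    intro a
    simp only [pvScan]
    rw [pvMod_addL, ih (a + v)]
    congr 1
    simp [List.sum_cons]; ring

theorem pvScan_last (m a : Int) (l : List Int) :
    (a :: (pvScan m a l).1).getD l.length 0 = (pvScan m a l).2 := by
  induction l generalizing a with
  | nil => rfl
  | cons v vs ih => simpa [pvScan] using ih (PySem.Int.mod (a + v) m)

-- ---- list-surgery helpers ----
theorem pvGetLeft (a : Int) (l r : List Int) (u : Nat) (h : u ≤ l.length) :
    (a :: (l ++ r)).getD u 0 = (a :: l).getD u 0 := by
  cases u with
  | zero => rfl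
  | succ n => simp [List.getD, List.getElem?_append_left (show n < l.length by omega)]

theorem pvGetRight (a : Int) (l r : List Int) (u : Nat) (h : l.length < u) :
    (a :: (l ++ r)).getD u 0 = r.getD (u - l.length - 1) 0 := by
  cases u with
  | zero => omega
  | succ n =>
    have h2 : n + 1 - l.length - 1 = n - l.length := by omega
    simp [List.getD, List.getElem?_append_right (show l.length ≤ n by omega), h2]

theorem pvSetMid (a v : Int) (l r : List Int) (n : Nat) (hn : n = l.length + 1) (hr : r ≠ []) :
    (a :: (l ++ r)).set n v = a :: ((l ++ [v]) ++ r.tail) := by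
  subst hn
  cases r with
  | nil => exact absurd rfl hr
  | cons x r' =>
    rw [List.set_cons_succ, List.set_append, if_neg (lt_irrefl _), Nat.sub_self,
      List.set_cons_zero]
    simp

-- ---- structural facts about forward rows and A's array ----
theorem pvBstep_length (m : Int) (cnt : List Int) (c : Char) :
    (pvBstep m cnt c).length = cnt.length + 1 := by
  unfold pvBstep
  split_ifs <;> simp [pvScan_length]

theorem pvR_succ (m : Int) (cs : List Char) (K : Nat) (h : K < cs.length) :
    pvR m cs (K + 1) = pvBstep m (pvR m cs K) (cs.getD K ' ') := by
  rw [List.getD_eq_getElem _ _ h]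
  unfold pvR
  rw [List.take_add_one, List.getElem?_eq_getElem h,
    show (some cs[K]).toList = [cs[K]] from rfl, List.foldl_append]
  rfl

theorem pvR_length (m : Int) (cs : List Char) (K : Nat) (h : K ≤ cs.length) :
    (pvR m cs K).length = K + 1 := by
  induction K with
  | zero => rfl
  | succ n ih =>
    rw [pvR_succ m cs n (by omega), pvBstep_length, ih (by omega)]

theorem pvDD_length (m : Int) (cs : List Char) (K : Nat) (h : K ≤ cs.length) :
    (pvDD m cs K).length = cs.length + 2 := by
  unfold pvDD
  split_ifs with h0
  · simp
  · simp [pvScan_length, pvR_length m cs K h]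
    omega

theorem pvDD_cons (m : Int) (cs : List Char) (K : Nat) :
    pvDD m cs K = 0 :: (pvDD m cs K).tail := by
  unfold pvDD
  split_ifs <;> rfl

theorem pvDD_getD (m : Int) (cs : List Char) (K u : Nat) (hK : K ≤ cs.length) (hu : u ≤ K + 1) :
    PySem.Int.mod ((pvDD m cs K).getD u 0) m
      = PySem.Int.mod (((0 : Int) :: (pvScan m 0 (pvR m cs K)).1).getD u 0) m := by
  by_cases h0 : K = 0
  · subst h0
    interval_cases u
    · rfl
    · show PySem.Int.mod ((0 :: List.replicate (cs.length + 1) 1).getD 1 0) m = _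
      have h1 : ((0 : Int) :: List.replicate (cs.length + 1) 1).getD 1 0 = 1 := by
        show (List.replicate (cs.length + 1) (1 : Int)).getD 0 0 = 1
        exact List.getD_replicate _ (by omega)
      rw [h1]
      show _ = PySem.Int.mod (((0 : Int) :: (pvScan m 0 [1]).1).getD 1 0) m
      simp [pvScan, pvMod_mod]
  · show PySem.Int.mod ((pvDD m cs K).getD u 0) m = _
    unfold pvDD
    rw [if_neg h0, pvGetLeft _ _ _ u (by rw [pvScan_length, pvR_length m cs K hK]; omega)]

theorem pvTL_getD (m : Int) (D : List Int) (c : Int) (len kp1 u : Nat) (h : u < len) :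
    (pvTL m D c len kp1).getD u 0 =
      if c = -1 then D.getD u 0
      else if c = 1 then D.getD kp1 0 - D.getD u 0
      else D.getD kp1 0 := by
  simp [pvTL, List.getD, h]

theorem pvTL_length (m : Int) (D : List Int) (c : Int) (len kp1 : Nat) :
    (pvTL m D c len kp1).length = len := by
  simp [pvTL]

-- ---- inner-loop state lemmas ----
theorem pvScan_take_snoc (m : Int) (tl : List Int) (t : Nat) (h : t < tl.length) :
    pvScan m 0 (tl.take (t + 1))
      = ((pvScan m 0 (tl.take t)).1
            ++ [PySem.Int.mod ((pvScan m 0 (tl.take t)).2 + tl.getD t 0) m],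
         PySem.Int.mod ((pvScan m 0 (tl.take t)).2 + tl.getD t 0) m) := by
  rw [List.take_add_one, List.getElem?_eq_getElem h,
    show (some tl[t]).toList = [tl[t]] from rfl, pvScan_append]
  simp [pvScan, List.getD, List.getElem?_eq_getElem h]

theorem pvSt_acc (m : Int) (tl tail : List Int) (t : Nat) (h : t ≤ tl.length) :
    (pvSt m tl tail t).getD t 0 = (pvScan m 0 (tl.take t)).2 := by
  unfold pvSt
  rw [pvGetLeft _ _ _ t (by rw [pvScan_length, List.length_take]; omega)]
  set l := tl.take t with hl
  have h2 : l.length = t := by rw [hl, List.length_take]; omega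
  rw [← h2]
  exact pvScan_last m 0 l

theorem pvSt_hi (m : Int) (tl tail : List Int) (t' u : Nat) (h1 : t' < u) (h2 : t' ≤ tl.length) :
    (pvSt m tl tail t').getD u 0 = ((0 : Int) :: tail).getD u 0 := by
  unfold pvSt
  rw [pvGetRight _ _ _ u (by rw [pvScan_length, List.length_take]; omega)]
  rw [pvScan_length, List.length_take]
  have hmn : min t' tl.length = t' := by omega
  rw [hmn]
  cases u with
  | zero => omega
  | succ n =>
    rw [List.getD_cons_succ]
    have harith : n + 1 - t' - 1 = n - t' := by omega
    rw [harith]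
    simp only [List.getD, List.getElem?_drop]
    have h3 : t' + (n - t') = n := by omega
    rw [h3]

theorem pvDpSet (m : Int) (tl tail : List Int) (t : Nat) (v : Int)
    (ht : t < tl.length) (ht2 : t < tail.length)
    (hv : v = PySem.Int.mod ((pvScan m 0 (tl.take t)).2 + tl.getD t 0) m) :
    (pvSt m tl tail t).set (t + 1) v = pvSt m tl tail (t + 1) := by
  unfold pvSt
  rw [pvScan_take_snoc m tl t ht, hv]
  rw [pvSetMid _ _ _ _ (t + 1) (by rw [pvScan_length, List.length_take]; omega)
      (by simp [List.drop_eq_nil_iff]; omega)]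
  rw [List.tail_drop]

theorem pvDppSet (m : Int) (tl tail : List Int) (t : Nat)
    (ht : t ≤ tl.length) (ht2 : t ≤ tail.length) :
    (pvSt m tl tail (t - 1)).set t ((pvScan m 0 (tl.take t)).2) = pvSt m tl tail t := by
  cases t with
  | zero =>
    show (pvSt m tl tail 0).set 0 ((pvScan m 0 (tl.take 0)).2) = pvSt m tl tail 0
    simp [pvSt, pvScan, List.set_cons_zero]
  | succ u =>
    show (pvSt m tl tail u).set (u + 1) _ = _
    exact pvDpSet m tl tail u _ (by omega) (by omega)
      (by rw [pvScan_take_snoc m tl u (by omega)])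

-- the inner loop body sends the state at t to the state at t+1
theorem pvInner_step (cond tail : List Int) (m : Int) (K t : Nat)
    (htail : K + 1 < tail.length) (ht : t ≤ K + 1) :
    pvInner cond m ((K : Int) + 2)
        (pvSt m (pvTL m (0 :: tail) (cond.getD K 0) (K + 2) (K + 1)) tail t,
         pvSt m (pvTL m (0 :: tail) (cond.getD K 0) (K + 2) (K + 1)) tail (t - 1))
        ((t : Int) + 1)
      = (pvSt m (pvTL m (0 :: tail) (cond.getD K 0) (K + 2) (K + 1)) tail (t + 1),
         pvSt m (pvTL m (0 :: tail) (cond.getD K 0) (K + 2) (K + 1)) tail t) := by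
  set c := cond.getD K 0 with hc
  set tl := pvTL m (0 :: tail) c (K + 2) (K + 1) with htl
  have hlen : tl.length = K + 2 := pvTL_length m (0 :: tail) c (K + 2) (K + 1)
  have hcast1 : (K : Int) + 2 - 2 = ((K : Nat) : Int) := by ring
  have hcast2 : (t : Int) + 1 - 1 = ((t : Nat) : Int) := by ring
  have hcast3 : (t : Int) + 1 = (((t + 1 : Nat)) : Int) := by push_cast; ring
  have hcast4 : (K : Int) + 2 - 1 = (((K + 1 : Nat)) : Int) := by push_cast; ring
  have hdp : PySem.List.pyGetD (pvSt m tl tail t) ((t : Int) + 1 - 1) 0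
      = (pvScan m 0 (tl.take t)).2 := by
    rw [hcast2, PySem.List.pyGetD_natCast]
    exact pvSt_acc m tl tail t (by omega)
  have hdppt : PySem.List.pyGetD (pvSt m tl tail (t - 1)) ((t : Int) + 1 - 1) 0
      = ((0 : Int) :: tail).getD t 0 := by
    rw [hcast2, PySem.List.pyGetD_natCast]
    cases t with
    | zero => rfl
    | succ u => exact pvSt_hi m tl tail u (u + 1) (by omega) (by omega)
  have hdppK : PySem.List.pyGetD (pvSt m tl tail (t - 1)) ((K : Int) + 2 - 1) 0
      = ((0 : Int) :: tail).getD (K + 1) 0 := by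
    rw [hcast4, PySem.List.pyGetD_natCast]
    exact pvSt_hi m tl tail (t - 1) (K + 1) (by omega) (by omega)
  have htlt : ∀ w : Int,
      PySem.List.pySetD (pvSt m tl tail t) ((t : Int) + 1) w
        = (pvSt m tl tail t).set (t + 1) w := by
    intro w; rw [hcast3, PySem.List.pySetD_natCast]
  have hdp' : ∀ w : Int, PySem.List.pyGetD ((pvSt m tl tail t).set (t + 1) w) ((t : Int) + 1 - 1) 0
      = (pvScan m 0 (tl.take t)).2 := by
    intro w
    rw [hcast2, PySem.List.pyGetD_natCast]
    have : ((pvSt m tl tail t).set (t + 1) w).getD t 0 = (pvSt m tl tail t).getD t 0 := by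
      simp [List.getD, List.getElem?_set_ne (show t + 1 ≠ t by omega)]
    rw [this]
    exact pvSt_acc m tl tail t (by omega)
  have hset2 : PySem.List.pySetD (pvSt m tl tail (t - 1)) ((t : Int) + 1 - 1)
        ((pvScan m 0 (tl.take t)).2)
      = pvSt m tl tail t := by
    rw [hcast2, PySem.List.pySetD_natCast]
    exact pvDppSet m tl tail t (by omega) (by omega)
  have htgt : tl.getD t 0 =
      if c = -1 then ((0 : Int) :: tail).getD t 0
      else if c = 1 then ((0 : Int) :: tail).getD (K + 1) 0 - ((0 : Int) :: tail).getD t 0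
      else ((0 : Int) :: tail).getD (K + 1) 0 := by
    rw [htl]; exact pvTL_getD m (0 :: tail) c (K + 2) (K + 1) t (by omega)
  simp only [pvInner]
  rw [hcast1, PySem.List.pyGetD_natCast, ← hc]
  by_cases h1 : c = -1
  · rw [if_pos h1]
    rw [hdp, hdppt, htlt, hdp', hset2]
    rw [pvDpSet m tl tail t _ (by omega) (by omega)
      (by rw [htgt, if_pos h1])]
  · rw [if_neg h1]
    by_cases h2 : c = 1
    · rw [if_pos h2]
      rw [hdp, hdppt, hdppK, htlt, hdp', hset2]
      rw [pvDpSet m tl tail t _ (by omega) (by omega)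
        (by rw [htgt, if_neg h1, if_pos h2, add_sub_assoc])]
    · rw [if_neg h2]
      rw [hdp, hdppK, htlt, hdp', hset2]
      rw [pvDpSet m tl tail t _ (by omega) (by omega)
        (by rw [htgt, if_neg h1, if_neg h2])]

-- ---- the three loop-characterisation lemmas ----
theorem pvInner_fold (cond tail : List Int) (m : Int) (K : Nat) (htail : K + 1 < tail.length) :
    ∀ t, t ≤ K + 2 →
    (PySem.List.pyRange 1 ((t : Int) + 1) 1).foldl (pvInner cond m ((K : Int) + 2))
        (0 :: tail, 0 :: tail)
      = (pvSt m (pvTL m (0 :: tail) (cond.getD K 0) (K + 2) (K + 1)) tail t,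
         pvSt m (pvTL m (0 :: tail) (cond.getD K 0) (K + 2) (K + 1)) tail (t - 1)) := by
  intro t
  induction t with
  | zero =>
    intro _
    rw [show (((0 : Nat) : Int)) + 1 = 1 by norm_num,
      PySem.List.pyRange_one_eq_nil (le_refl 1)]
    simp [pvSt, pvScan]
  | succ t ih =>
    intro ht
    rw [show (((t + 1 : Nat)) : Int) + 1 = ((t : Int) + 1) + 1 by push_cast; ring,
      PySem.List.pyRange_one_succ_right (by omega), List.foldl_append, ih (by omega),
      List.foldl_cons, List.foldl_nil]
    have := pvInner_step cond tail m K t htail (by omega)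
    rw [this]
    simp

theorem pvCopy_fold (vs tail : List Int) (a : Int) (K : Nat)
    (hvs : vs.length = K + 2) (hacc : ((0 : Int) :: vs).getD (K + 2) 0 = a) :
    ∀ w, K + 2 ≤ w → w ≤ tail.length →
    (PySem.List.pyRange ((K : Int) + 3) ((w : Int) + 1) 1).foldl pvCopy
        (0 :: (vs ++ tail.drop (K + 2)), 0 :: (vs ++ tail.drop (K + 2)))
      = (0 :: ((vs ++ List.replicate (w - (K + 2)) a) ++ tail.drop w),
         0 :: ((vs ++ List.replicate (w - (K + 2)) a) ++ tail.drop w)) := by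
  intro w hw
  induction w, hw using Nat.le_induction with
  | base =>
    intro _
    rw [show (((K + 2 : Nat)) : Int) + 1 = (K : Int) + 3 by push_cast; ring,
      PySem.List.pyRange_one_eq_nil (by omega)]
    simp
  | succ w hw ih =>
    intro hw2
    rw [show (((w + 1 : Nat)) : Int) + 1 = ((w : Int) + 1) + 1 by push_cast; ring,
      PySem.List.pyRange_one_succ_right (by omega), List.foldl_append,
      ih (by omega), List.foldl_cons, List.foldl_nil]
    have hget : ((0 : Int) :: ((vs ++ List.replicate (w - (K + 2)) a) ++ tail.drop w)).getD w 0
        = a := by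
      rw [pvGetLeft _ _ _ w (by simp [hvs]; omega)]
      rcases Nat.eq_or_lt_of_le hw with he | hlt
      · rw [← he]
        simpa using hacc
      · rw [pvGetRight _ _ _ w (by rw [hvs]; omega), hvs]
        exact List.getD_replicate _ (by omega)
    have hdp : PySem.List.pyGetD
        ((0 : Int) :: ((vs ++ List.replicate (w - (K + 2)) a) ++ tail.drop w))
        ((w : Int) + 1 - 1) 0 = a := by
      rw [show (w : Int) + 1 - 1 = ((w : Nat) : Int) by ring, PySem.List.pyGetD_natCast]
      exact hget
    have hset : PySem.List.pySetD
        ((0 : Int) :: ((vs ++ List.replicate (w - (K + 2)) a) ++ tail.drop w)) ((w : Int) + 1) a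
        = 0 :: ((vs ++ List.replicate (w + 1 - (K + 2)) a) ++ tail.drop (w + 1)) := by
      rw [show (w : Int) + 1 = ((w + 1 : Nat) : Int) by push_cast; ring,
        PySem.List.pySetD_natCast]
      rw [pvSetMid _ _ _ _ (w + 1) (by simp [hvs]; omega)
        (by simp [List.drop_eq_nil_iff]; omega)]
      rw [List.tail_drop]
      simp only [List.append_assoc]
      rw [show ([a] : List Int) ++ tail.drop (w + 1)
            = List.replicate 1 a ++ tail.drop (w + 1) from rfl,
        ← List.append_assoc (List.replicate (w - (K + 2)) a), ← List.replicate_add,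
        show w - (K + 2) + 1 = w + 1 - (K + 2) by omega]
    have hget2 : PySem.List.pyGetD
        ((0 : Int) :: ((vs ++ List.replicate (w + 1 - (K + 2)) a) ++ tail.drop (w + 1)))
        ((w : Int) + 1) 0 = a := by
      rw [show (w : Int) + 1 = ((w + 1 : Nat) : Int) by push_cast; ring,
        PySem.List.pyGetD_natCast]
      rw [pvGetLeft _ _ _ (w + 1) (by simp [hvs]; omega),
        pvGetRight _ _ _ (w + 1) (by rw [hvs]; omega), hvs]
      exact List.getD_replicate _ (by omega)
    simp only [pvCopy]
    rw [hdp, hset, hget2, hset]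

theorem pvTL_congr (m : Int) (cs : List Char) (K : Nat) (hK : K < cs.length) :
    List.Forall₂ (fun a b => PySem.Int.mod a m = PySem.Int.mod b m)
      (pvTL m (pvDD m cs K) (pvCh (cs.getD K ' ')) (K + 2) (K + 1))
      (pvR m cs (K + 1)) := by
  have hRlen : (pvR m cs K).length = K + 1 := pvR_length m cs K (by omega)
  have hlast : ((0 : Int) :: (pvScan m 0 (pvR m cs K)).1).getD (K + 1) 0
      = (pvScan m 0 (pvR m cs K)).2 := by
    rw [← hRlen]
    exact pvScan_last m 0 (pvR m cs K)
  rw [List.forall₂_iff_get]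
  constructor
  · rw [pvTL_length, pvR_length m cs (K + 1) (by omega)]
  · intro u h1 h2
    have hu : u < K + 2 := by rwa [pvTL_length] at h1
    rw [List.get_eq_getElem, List.get_eq_getElem, ← List.getD_eq_getElem _ (0 : Int) h1,
      ← List.getD_eq_getElem _ (0 : Int) h2]
    rw [pvTL_getD _ _ _ _ _ _ hu]
    rw [pvR_succ m cs K hK]
    set ch := cs.getD K ' ' with hch0
    unfold pvBstep
    by_cases hch : ch = '<'
    · rw [if_pos hch, show pvCh ch = -1 by simp [pvCh, hch], if_pos rfl]
      exact pvDD_getD m cs K u (by omega) (by omega)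
    · by_cases hch2 : ch = '='
      · rw [if_neg hch, if_pos hch2, show pvCh ch = 0 by simp [pvCh, hch2],
          if_neg (by norm_num), if_neg (by norm_num)]
        rw [List.getD_replicate _ (by simp [pvScan_length, hRlen]; omega)]
        rw [pvDD_getD m cs K (K + 1) (by omega) (by omega), hlast]
      · rw [if_neg hch, if_neg hch2, show pvCh ch = 1 by simp [pvCh, hch, hch2],
          if_neg (by norm_num), if_pos rfl]
        have hul : u < ((0 : Int) :: (pvScan m 0 (pvR m cs K)).1).length := by
          simp [pvScan_length, hRlen]; omega
        have hmap : ((((0 : Int) :: (pvScan m 0 (pvR m cs K)).1)).map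
              (fun p => PySem.Int.mod ((pvScan m 0 (pvR m cs K)).2 - p) m)).getD u 0
            = PySem.Int.mod ((pvScan m 0 (pvR m cs K)).2
                - ((0 : Int) :: (pvScan m 0 (pvR m cs K)).1).getD u 0) m := by
          rw [List.getD_eq_getElem _ _ (by simpa using hul), List.getElem_map,
            ← List.getD_eq_getElem _ (0 : Int) hul]
        rw [hmap, pvMod_mod, pvModCong_iff]
        have c1 := pvDD_getD m cs K (K + 1) (by omega) (by omega)
        have c2 := pvDD_getD m cs K u (by omega) (by omega)
        rw [hlast] at c1
        rw [pvModCong_iff] at c1 c2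
        have harith : (pvDD m cs K).getD (K + 1) 0 - (pvDD m cs K).getD u 0
              - ((pvScan m 0 (pvR m cs K)).2
                - ((0 : Int) :: (pvScan m 0 (pvR m cs K)).1).getD u 0)
            = ((pvDD m cs K).getD (K + 1) 0 - (pvScan m 0 (pvR m cs K)).2)
              - ((pvDD m cs K).getD u 0
                - ((0 : Int) :: (pvScan m 0 (pvR m cs K)).1).getD u 0) := by ring
        rw [harith]
        exact dvd_sub c1 c2

theorem pvOuter_step (m : Int) (cs : List Char) (K : Nat) (hK : K < cs.length) :
    pvOuter (cs.map pvCh) m ((cs.length : Int) + 1) (pvDD m cs K, pvDD m cs K) ((K : Int) + 2)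
      = (pvDD m cs (K + 1), pvDD m cs (K + 1)) := by
  have hcond : (cs.map pvCh).getD K 0 = pvCh (cs.getD K ' ') := by
    rw [List.getD_eq_getElem _ _ (by simpa using hK), List.getElem_map,
      List.getD_eq_getElem _ _ hK]
  have hDD := pvDD_cons m cs K
  set tail := (pvDD m cs K).tail with htail
  have htlen : tail.length = cs.length + 1 := by
    have h2 := pvDD_length m cs K (le_of_lt hK)
    rw [hDD] at h2
    simpa using h2
  simp only [pvOuter]
  rw [hDD]
  rw [show (K : Int) + 2 + 1 = (((K + 2 : Nat)) : Int) + 1 by push_cast; ring,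
    pvInner_fold (cs.map pvCh) tail m K (by omega) (K + 2) (le_refl _), hcond]
  set tl := pvTL m (0 :: tail) (pvCh (cs.getD K ' ')) (K + 2) (K + 1) with htl2
  have hlen : tl.length = K + 2 := pvTL_length m (0 :: tail) _ (K + 2) (K + 1)
  have hfull : tl.take (K + 2) = tl := by
    rw [show K + 2 = tl.length from hlen.symm]
    exact List.take_length
  rw [show K + 2 - 1 = K + 1 by omega]
  have hacc2 : PySem.List.pyGetD (pvSt m tl tail (K + 2)) ((K : Int) + 2) 0
      = (pvScan m 0 tl).2 := by
    rw [show (K : Int) + 2 = ((K + 2 : Nat) : Int) by push_cast; ring,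
      PySem.List.pyGetD_natCast, pvSt_acc m tl tail (K + 2) (by omega), hfull]
  have hset2 : PySem.List.pySetD (pvSt m tl tail (K + 1)) ((K : Int) + 2) ((pvScan m 0 tl).2)
      = pvSt m tl tail (K + 2) := by
    rw [show (K : Int) + 2 = ((K + 2 : Nat) : Int) by push_cast; ring,
      PySem.List.pySetD_natCast]
    have h3 := pvDppSet m tl tail (K + 2) (by omega) (by omega)
    rw [hfull] at h3
    exact h3
  rw [hacc2, hset2]
  have hst : pvSt m tl tail (K + 2) = 0 :: ((pvScan m 0 tl).1 ++ tail.drop (K + 2)) := by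
    unfold pvSt
    rw [hfull]
  rw [hst]
  rw [show (((K + 2 : Nat)) : Int) + 1 = (K : Int) + 3 by push_cast; ring,
    show (cs.length : Int) + 1 + 1 = (((cs.length + 1 : Nat)) : Int) + 1 by push_cast; ring]
  rw [pvCopy_fold (pvScan m 0 tl).1 tail (pvScan m 0 tl).2 K
    (by rw [pvScan_length, hlen])
    (by rw [show K + 2 = tl.length from hlen.symm]; exact pvScan_last m 0 tl)
    (cs.length + 1) (by omega) (by omega)]
  have hscan : pvScan m 0 tl = pvScan m 0 (pvR m cs (K + 1)) := by
    apply pvScan_congr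
    rw [htl2, ← hcond]
    have h4 : (0 : Int) :: tail = pvDD m cs K := hDD.symm
    rw [h4, hcond]
    exact pvTL_congr m cs K hK
  rw [hscan]
  have hdrop : tail.drop (cs.length + 1) = [] := by
    rw [← htlen]
    exact List.drop_length
  rw [hdrop]
  have hDD1 : pvDD m cs (K + 1) = 0 :: ((pvScan m 0 (pvR m cs (K + 1))).1
      ++ List.replicate (cs.length - (K + 1)) (pvScan m 0 (pvR m cs (K + 1))).2) := by
    unfold pvDD
    rw [if_neg (by omega)]
  rw [hDD1, show cs.length + 1 - (K + 2) = cs.length - (K + 1) by omega]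
  simp

theorem pvOuter_fold (m : Int) (cs : List Char) :
    ∀ K, K ≤ cs.length →
    (PySem.List.pyRange 2 ((K : Int) + 2) 1).foldl
        (pvOuter (cs.map pvCh) m ((cs.length : Int) + 1)) (pvDD m cs 0, pvDD m cs 0)
      = (pvDD m cs K, pvDD m cs K) := by
  intro K
  induction K with
  | zero =>
    intro _
    rw [show (((0 : Nat)) : Int) + 2 = 2 by norm_num,
      PySem.List.pyRange_one_eq_nil (by norm_num)]
    rfl
  | succ n ih =>
    intro h
    rw [show (((n + 1 : Nat)) : Int) + 2 = ((n : Int) + 2) + 1 by push_cast; ring,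
      PySem.List.pyRange_one_succ_right (by omega), List.foldl_append, ih (by omega),
      List.foldl_cons, List.foldl_nil, pvOuter_step m cs n (by omega)]

-- ---- relating port A to the helpers ----
theorem pvCond_build (s : String) :
    (PySem.List.pyRange 0 (PySem.Str.len s) 1).foldl (fun (cond : List Int) i =>
        if PySem.Str.pyGet? s i = some '<' then PySem.List.pySetD cond i (-1)
        else if PySem.Str.pyGet? s i = some '=' then PySem.List.pySetD cond i 0
        else PySem.List.pySetD cond i 1) (List.replicate (PySem.Str.len s).toNat 0)
      = s.toList.map pvCh := by
  rw [PySem.Str.len_eq]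
  have gen : ∀ t, t ≤ s.toList.length →
      (PySem.List.pyRange 0 ((t : Nat) : Int) 1).foldl (fun (cond : List Int) i =>
          if PySem.Str.pyGet? s i = some '<' then PySem.List.pySetD cond i (-1)
          else if PySem.Str.pyGet? s i = some '=' then PySem.List.pySetD cond i 0
          else PySem.List.pySetD cond i 1)
        (List.replicate ((s.toList.length : Int)).toNat 0)
      = (s.toList.take t).map pvCh ++ List.replicate (s.toList.length - t) 0 := by
    intro t
    induction t with
    | zero =>
      intro _
      rw [show (((0 : Nat)) : Int) = 0 by norm_num, PySem.List.pyRange_one_eq_nil (le_refl 0)]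
      simp
    | succ t ih =>
      intro ht
      rw [show (((t + 1 : Nat)) : Int) = ((t : Nat) : Int) + 1 by push_cast; ring,
        PySem.List.pyRange_one_succ_right (by omega), List.foldl_append, ih (by omega),
        List.foldl_cons, List.foldl_nil]
      have htlt : t < s.toList.length := by omega
      have hget : PySem.Str.pyGet? s ((t : Nat) : Int) = some (s.toList[t]'htlt) := by
        rw [PySem.Str.pyGet?_natCast]
        exact List.getElem?_eq_getElem htlt
      rw [hget]
      have hbody : ∀ (acc : List Int),
          (if some (s.toList[t]'htlt) = some '<' then PySem.List.pySetD acc ((t : Nat) : Int) (-1)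
           else if some (s.toList[t]'htlt) = some '=' then PySem.List.pySetD acc ((t : Nat) : Int) 0
           else PySem.List.pySetD acc ((t : Nat) : Int) 1)
          = acc.set t (pvCh (s.toList[t]'htlt)) := by
        intro acc
        by_cases h1 : s.toList[t]'htlt = '<'
        · rw [if_pos (by rw [h1]), PySem.List.pySetD_natCast]
          simp [pvCh, h1]
        · by_cases h2 : s.toList[t]'htlt = '='
          · rw [if_neg (by simpa using h1), if_pos (by rw [h2]), PySem.List.pySetD_natCast]
            simp [pvCh, h2]
          · rw [if_neg (by simpa using h1), if_neg (by simpa using h2),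
              PySem.List.pySetD_natCast]
            simp [pvCh, h1, h2]
      rw [hbody]
      have hlen : ((s.toList.take t).map pvCh).length = t := by
        rw [List.length_map, List.length_take]
        omega
      rw [List.set_append, if_neg (by rw [hlen]; omega), hlen, Nat.sub_self,
        show s.toList.length - t = (s.toList.length - (t + 1)) + 1 by omega,
        List.replicate_succ, List.set_cons_zero]
      rw [List.take_add_one, List.getElem?_eq_getElem htlt]
      simp
      rw [List.take_add_one, List.getElem?_map, List.getElem?_eq_getElem htlt]
      simp
  have h2 := gen s.toList.length (le_refl _)
  rw [List.take_length, Nat.sub_self] at h2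
  simpa using h2

theorem pvA_eq (s : String) (m : Int) (h : s.toList ≠ []) :
    countRestrictedPermutationString s m
      = PySem.Int.mod ((pvR m s.toList s.toList.length).sum) m := by
  have hL : 0 < s.toList.length := List.length_pos_iff.mpr h
  simp only [countRestrictedPermutationString]
  rw [pvCond_build s]
  simp only [countRestrictedPermutation, List.length_map]
  have hinit : (List.replicate (((s.toList.length : Int) + 1 + 1)).toNat 1).set 0 (0 : Int)
      = pvDD m s.toList 0 := by
    rw [show (((s.toList.length : Int) + 1 + 1)).toNat = (s.toList.length + 1) + 1 by omega,
      List.replicate_succ, List.set_cons_zero]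
    rfl
  rw [hinit]
  rw [show (s.toList.length : Int) + 1 + 1 = ((s.toList.length : Nat) : Int) + 2 by ring,
    pvOuter_fold m s.toList s.toList.length (le_refl _)]
  rw [show (s.toList.length : Int) + 1 = (((s.toList.length + 1 : Nat)) : Int) by push_cast; ring,
    PySem.List.pyGetD_natCast]
  have hRlen := pvR_length m s.toList s.toList.length (le_refl _)
  unfold pvDD
  rw [if_neg (by omega)]
  rw [pvGetLeft _ _ _ (s.toList.length + 1) (by simp only [pvScan_length, hRlen, le_refl])]
  rw [show s.toList.length + 1 = (pvR m s.toList s.toList.length).length from hRlen.symm,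
    pvScan_last]
  have hz : PySem.Int.mod 0 m = 0 := by simp [PySem.Int.mod]
  have hA := pvScan_acc m (pvR m s.toList s.toList.length) 0
  rw [hz, zero_add] at hA
  exact hA

-- ================= B-side: the backward (adjoint) pass =================

-- B's backward step, expressed through pvScan
def pvBW (m : Int) (w : List Int) (c : Char) : List Int :=
  if c = '<' then (pvScan m 0 w.tail.reverse).1.reverse
  else if c = '=' then List.replicate (w.length - 1) (pvScan m 0 w).2
  else (pvScan m 0 w.dropLast).1

-- backward state after consuming the suffix l (foldr applies the last char first)
def pvV (m : Int) (start : List Int) (l : List Char) : List Int :=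
  l.foldr (fun c w => pvBW m w c) start

-- exact (mod-free) inclusive prefix sums / inclusive suffix sums
def pvIP : List Int → List Int
  | [] => []
  | x :: xs => x :: (pvIP xs).map (fun y => x + y)

def pvIS : List Int → List Int
  | [] => []
  | x :: xs => (x + xs.sum) :: pvIS xs

-- dot product (truncating at the shorter list; we always use equal lengths)
def pvDot : List Int → List Int → Int
  | [], _ => 0
  | _ :: _, [] => 0
  | a :: as, b :: bs => a * b + pvDot as bs

-- exact versions of the forward and backward steps
def pvFwdE (v : List Int) (c : Char) : List Int :=
  if c = '<' then 0 :: pvIP v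
  else if c = '=' then List.replicate (v.length + 1) v.sum
  else (0 :: pvIP v).map (fun p => v.sum - p)

def pvBwdE (w : List Int) (c : Char) : List Int :=
  if c = '<' then pvIS w.tail
  else if c = '=' then List.replicate (w.length - 1) w.sum
  else pvIP w.dropLast

-- ---- Forall₂ utilities ----
theorem pvF2_map {R S : Int → Int → Prop} (f g : Int → Int) :
    ∀ (l l' : List Int), List.Forall₂ R l l' → (∀ a b, R a b → S (f a) (g b)) →
    List.Forall₂ S (l.map f) (l'.map g) := by
  intro l l' h himp
  induction h with
  | nil => exact List.Forall₂.nil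
  | cons hab _ ih => exact List.Forall₂.cons (himp _ _ hab) ih

theorem pvF2_replicate {R : Int → Int → Prop} (a b : Int) (h : R a b) :
    ∀ k, List.Forall₂ R (List.replicate k a) (List.replicate k b) := by
  intro k
  induction k with
  | zero => exact List.Forall₂.nil
  | succ n ih => simpa [List.replicate_succ] using List.Forall₂.cons h ih

-- ---- pvIP / pvIS facts ----
theorem pvIP_length (l : List Int) : (pvIP l).length = l.length := by
  induction l with
  | nil => rfl
  | cons x xs ih => simp [pvIP, ih]

theorem pvIP_append (a b : List Int) :
    pvIP (a ++ b) = pvIP a ++ (pvIP b).map (fun y => a.sum + y) := by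
  induction a with
  | nil => simp [pvIP]
  | cons x xt ih =>
    simp only [List.cons_append, pvIP, ih, List.map_append, List.map_map, List.sum_cons]
    have hc : ((fun y => x + y) ∘ fun y => xt.sum + y) = (fun y => x + xt.sum + y) := by
      funext y; simp [Function.comp]; ring
    rw [hc]

theorem pvIP_reverse (l : List Int) : (pvIP l.reverse).reverse = pvIS l := by
  induction l with
  | nil => rfl
  | cons x xs ih =>
    rw [List.reverse_cons, pvIP_append]
    simp only [pvIP, List.map_cons, List.map_nil, List.reverse_append, List.reverse_cons,
      List.reverse_nil, List.nil_append, List.sum_reverse]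
    simp only [List.singleton_append]
    rw [ih]
    show (xs.sum + x) :: pvIS xs = pvIS (x :: xs)
    simp only [pvIS]
    congr 1
    ring

-- ---- congruences between mod and exact scans ----
theorem pvScan_cong_iP (m : Int) :
    ∀ (l : List Int) (a b : Int), PySem.Int.mod a m = PySem.Int.mod b m →
    List.Forall₂ (fun x y => PySem.Int.mod x m = PySem.Int.mod y m)
      (pvScan m a l).1 ((pvIP l).map (fun y => b + y)) := by
  intro l
  induction l with
  | nil => intro a b _; exact List.Forall₂.nil
  | cons x xs ih =>
    intro a b hab
    have hhead : PySem.Int.mod (PySem.Int.mod (a + x) m) m = PySem.Int.mod (b + x) m := by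
      rw [pvMod_mod, pvModCong_iff]
      rw [pvModCong_iff] at hab
      have : a + x - (b + x) = a - b := by ring
      rw [this]; exact hab
    have htail := ih (PySem.Int.mod (a + x) m) (b + x) hhead
    have hmap : ((pvIP xs).map (fun y => x + y)).map (fun y => b + y)
        = (pvIP xs).map (fun y => (b + x) + y) := by
      rw [List.map_map]
      congr 1
      funext y
      simp [Function.comp]; ring
    simp only [pvScan, pvIP, List.map_cons, hmap]
    exact List.Forall₂.cons hhead htail

theorem pvScan_cong_iP0 (m : Int) (l : List Int) :
    List.Forall₂ (fun x y => PySem.Int.mod x m = PySem.Int.mod y m)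
      (pvScan m 0 l).1 (pvIP l) := by
  have h := pvScan_cong_iP m l 0 0 rfl
  simpa using h

theorem pvScan_snd0 (m : Int) (l : List Int) :
    (pvScan m 0 l).2 = PySem.Int.mod l.sum m := by
  have hz : PySem.Int.mod 0 m = 0 := by simp [PySem.Int.mod]
  have h := pvScan_acc m l 0
  rw [hz, zero_add] at h
  exact h

theorem pvFoldl_scan (m : Int) :
    ∀ (l : List Int) (t : Int),
      l.foldl (fun t x => PySem.Int.mod (t + x) m) t = (pvScan m t l).2 := by
  intro l
  induction l with
  | nil => intro t; rfl
  | cons x xs ih => intro t; simp [pvScan, ih]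

theorem pvScan_mem (m : Int) :
    ∀ (l : List Int) (a x : Int), x ∈ (pvScan m a l).1 → PySem.Int.mod x m = x := by
  intro l
  induction l with
  | nil => intro a x hx; simp [pvScan] at hx
  | cons v vs ih =>
    intro a x hx
    simp only [pvScan, List.mem_cons] at hx
    rcases hx with h | h
    · rw [h]; exact pvMod_mod _ m
    · exact ih _ x h

-- step congruences to the exact steps
theorem pvBW_cong (m : Int) (w : List Int) (c : Char) :
    List.Forall₂ (fun x y => PySem.Int.mod x m = PySem.Int.mod y m)
      (pvBW m w c) (pvBwdE w c) := by
  unfold pvBW pvBwdE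
  split_ifs
  · rw [← pvIP_reverse w.tail]
    exact List.rel_reverse (pvScan_cong_iP0 m w.tail.reverse)
  · refine pvF2_replicate (R := fun x y => PySem.Int.mod x m = PySem.Int.mod y m) _ _ ?_ _
    show PySem.Int.mod ((pvScan m 0 w).2) m = PySem.Int.mod w.sum m
    rw [pvScan_snd0, pvMod_mod]
  · exact pvScan_cong_iP0 m w.dropLast

theorem pvBstep_cong (m : Int) (v : List Int) (c : Char) :
    List.Forall₂ (fun x y => PySem.Int.mod x m = PySem.Int.mod y m)
      (pvBstep m v c) (pvFwdE v c) := by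
  have hsnd : PySem.Int.mod ((pvScan m 0 v).2) m = PySem.Int.mod v.sum m := by
    rw [pvScan_snd0, pvMod_mod]
  unfold pvBstep pvFwdE
  split_ifs
  · exact List.Forall₂.cons (show PySem.Int.mod (0 : Int) m = PySem.Int.mod (0 : Int) m from rfl)
      (pvScan_cong_iP0 m v)
  · rw [show ((0 : Int) :: (pvScan m 0 v).1).length = v.length + 1 by
      simp [pvScan_length]]
    exact pvF2_replicate (R := fun x y => PySem.Int.mod x m = PySem.Int.mod y m) _ _ hsnd _
  · refine pvF2_map (R := fun x y => PySem.Int.mod x m = PySem.Int.mod y m)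
      (S := fun x y => PySem.Int.mod x m = PySem.Int.mod y m) _ _ _ _
      (List.Forall₂.cons (show PySem.Int.mod (0 : Int) m = PySem.Int.mod (0 : Int) m from rfl)
        (pvScan_cong_iP0 m v)) ?_
    intro a b hab
    rw [pvMod_mod, pvModCong_iff]
    rw [pvModCong_iff] at hab hsnd
    have harith : (pvScan m 0 v).2 - a - (v.sum - b)
        = ((pvScan m 0 v).2 - v.sum) - (a - b) := by ring
    rw [harith]
    exact dvd_sub hsnd hab

-- ---- pvDot facts ----
theorem pvDot_congL (m : Int) :
    ∀ (a a' : List Int), List.Forall₂ (fun x y => PySem.Int.mod x m = PySem.Int.mod y m) a a' →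
    ∀ (v : List Int), PySem.Int.mod (pvDot a v) m = PySem.Int.mod (pvDot a' v) m := by
  intro a a' h
  induction h with
  | nil => intro v; rfl
  | @cons x y l1 l2 hxy _ ih =>
    intro v
    cases v with
    | nil => rfl
    | cons z zs =>
      simp only [pvDot]
      rw [pvModCong_iff]
      rw [pvModCong_iff] at hxy
      have hd := ih zs
      rw [pvModCong_iff] at hd
      have harith : x * z + pvDot l1 zs - (y * z + pvDot l2 zs)
          = (x - y) * z + (pvDot l1 zs - pvDot l2 zs) := by ring
      rw [harith]
      exact dvd_add (Dvd.dvd.mul_right hxy z) hd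

theorem pvDot_congR (m : Int) :
    ∀ (b b' : List Int), List.Forall₂ (fun x y => PySem.Int.mod x m = PySem.Int.mod y m) b b' →
    ∀ (w : List Int), PySem.Int.mod (pvDot w b) m = PySem.Int.mod (pvDot w b') m := by
  intro b b' h
  induction h with
  | nil => intro w; cases w <;> rfl
  | @cons x y l1 l2 hxy _ ih =>
    intro w
    cases w with
    | nil => rfl
    | cons z zs =>
      simp only [pvDot]
      rw [pvModCong_iff]
      rw [pvModCong_iff] at hxy
      have hd := ih zs
      rw [pvModCong_iff] at hd
      have harith : z * x + pvDot zs l1 - (z * y + pvDot zs l2)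
          = z * (x - y) + (pvDot zs l1 - pvDot zs l2) := by ring
      rw [harith]
      exact dvd_add (Dvd.dvd.mul_left hxy z) hd

theorem pvDot_comm : ∀ (a b : List Int), pvDot a b = pvDot b a := by
  intro a
  induction a with
  | nil => intro b; cases b <;> rfl
  | cons x xt ih =>
    intro b
    cases b with
    | nil => rfl
    | cons y yt => simp only [pvDot, ih]; ring

theorem pvDot_map_add :
    ∀ (w l : List Int) (a : Int), w.length = l.length →
    pvDot w (l.map (fun y => a + y)) = a * w.sum + pvDot w l := by
  intro w
  induction w with
  | nil => intro l a h; cases l with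
    | nil => simp [pvDot]
    | cons y yt => simp at h
  | cons x xt ih =>
    intro l a h
    cases l with
    | nil => simp at h
    | cons y yt =>
      simp only [List.map_cons, pvDot, List.sum_cons]
      rw [ih yt a (by simpa using h)]
      ring

theorem pvDot_map_sub :
    ∀ (w l : List Int) (S : Int), w.length = l.length →
    pvDot w (l.map (fun p => S - p)) = S * w.sum - pvDot w l := by
  intro w
  induction w with
  | nil => intro l S h; cases l with
    | nil => simp [pvDot]
    | cons y yt => simp at h
  | cons x xt ih =>
    intro l S h
    cases l with
    | nil => simp at h
    | cons y yt =>
      simp only [List.map_cons, pvDot, List.sum_cons]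
      rw [ih yt S (by simpa using h)]
      ring

theorem pvDot_repl_left :
    ∀ (v : List Int) (a : Int), pvDot (List.replicate v.length a) v = a * v.sum := by
  intro v
  induction v with
  | nil => intro a; simp [pvDot]
  | cons y yt ih =>
    intro a
    simp only [List.length_cons, List.replicate_succ, pvDot, List.sum_cons, ih]
    ring

theorem pvDot_repl_right :
    ∀ (w : List Int) (a : Int), pvDot w (List.replicate w.length a) = a * w.sum := by
  intro w a
  rw [pvDot_comm]
  exact pvDot_repl_left w a

theorem pvDot_IS_IP :
    ∀ (w v : List Int), w.length = v.length →
    pvDot (pvIS w) v = pvDot w (pvIP v) := by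
  intro w
  induction w with
  | nil => intro v h; cases v with
    | nil => rfl
    | cons y yt => simp at h
  | cons x xt ih =>
    intro v h
    cases v with
    | nil => simp at h
    | cons v0 vt =>
      have hlen : xt.length = vt.length := by simpa using h
      simp only [pvIS, pvIP, pvDot]
      rw [pvDot_map_add xt (pvIP vt) v0 (by rw [pvIP_length]; exact hlen), ih vt hlen]
      ring

theorem pvDot_nil_right : ∀ (l : List Int), pvDot l [] = 0 := by
  intro l; cases l <;> rfl

theorem pvDot_map_add_left :
    ∀ (l u : List Int) (a : Int), l.length = u.length →
    pvDot (l.map (fun y => a + y)) u = a * u.sum + pvDot l u := by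
  intro l u a h
  rw [pvDot_comm, pvDot_map_add u l a h.symm, pvDot_comm]

theorem pvDot_split :
    ∀ (w v : List Int), w.length = v.length + 1 →
    pvDot (pvIP w.dropLast) v + pvDot (pvIS w.tail) v = w.sum * v.sum := by
  intro w
  induction w with
  | nil => intro v h; simp at h
  | cons x xt ih =>
    intro v h
    cases v with
    | nil => simp [pvDot_nil_right]
    | cons v0 vt =>
      cases xt with
      | nil => simp at h
      | cons y yt =>
        have hlen : (y :: yt).length = vt.length + 1 := by simpa using h
        have hdl : (x :: y :: yt).dropLast = x :: (y :: yt).dropLast := rfl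
        rw [hdl]
        have hIH := ih vt hlen
        simp only [List.tail_cons, List.sum_cons] at hIH
        have hiplen : (pvIP (y :: yt).dropLast).length = vt.length := by
          rw [pvIP_length, List.length_dropLast]
          simp at hlen ⊢
          omega
        simp only [pvIP, pvIS, pvDot, List.tail_cons, List.sum_cons]
        rw [pvDot_map_add_left (pvIP (y :: yt).dropLast) vt x hiplen]
        linear_combination hIH

-- lengths of the backward objects
theorem pvBW_length (m : Int) (w : List Int) (c : Char) :
    (pvBW m w c).length = w.length - 1 := by
  unfold pvBW
  split_ifs <;> simp [pvScan_length]

theorem pvV_cons (m : Int) (start : List Int) (c : Char) (l : List Char) :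
    pvV m start (c :: l) = pvBW m (pvV m start l) c := rfl

theorem pvV_length (m : Int) (start : List Int) :
    ∀ l : List Char, (pvV m start l).length = start.length - l.length := by
  intro l
  induction l with
  | nil => simp [pvV]
  | cons c lt ih =>
    rw [pvV_cons, pvBW_length, ih]
    simp
    omega

-- the single-step adjoint identity, modulo m
theorem pvAdj (m : Int) (w v : List Int) (c : Char) (h : w.length = v.length + 1) :
    PySem.Int.mod (pvDot (pvBW m w c) v) m = PySem.Int.mod (pvDot w (pvBstep m v c)) m := by
  rw [pvDot_congL m _ _ (pvBW_cong m w c) v, pvDot_congR m _ _ (pvBstep_cong m v c) w]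
  congr 1
  cases w with
  | nil => simp at h
  | cons x xt =>
    have hxt : xt.length = v.length := by simpa using h
    unfold pvBwdE pvFwdE
    split_ifs
    · -- '<'
      simp only [List.tail_cons, pvDot]
      rw [pvDot_IS_IP xt v hxt]
      ring
    · -- '='
      have h1 : (x :: xt).length - 1 = v.length := by simp [hxt]
      rw [h1, pvDot_repl_left]
      rw [show v.length + 1 = (x :: xt).length by simp [hxt], pvDot_repl_right]
      ring
    · -- '>'
      rw [pvDot_map_sub (x :: xt) (0 :: pvIP v) v.sum
        (by simp [pvIP_length, hxt])]
      have hz : pvDot (x :: xt) (0 :: pvIP v) = pvDot (pvIS xt) v := by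
        simp only [pvDot]
        rw [pvDot_IS_IP xt v hxt]
        ring
      rw [hz]
      have hsp := pvDot_split (x :: xt) v h
      have htl : (x :: xt).tail = xt := rfl
      rw [htl] at hsp
      linarith [hsp]

-- the backward pass computes the same pairing as the forward pass
theorem pvKey (m : Int) :
    ∀ (l : List Char) (v start : List Int), start.length = v.length + l.length →
    PySem.Int.mod (pvDot (pvV m start l) v) m
      = PySem.Int.mod (pvDot start (l.foldl (pvBstep m) v)) m := by
  intro l
  induction l with
  | nil => intro v start _; rfl
  | cons c lt ih =>
    intro v start hlen
    rw [pvV_cons]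
    have hW : (pvV m start lt).length = v.length + 1 := by
      rw [pvV_length]
      simp at hlen
      omega
    rw [pvAdj m _ v c hW]
    have := ih (pvBstep m v c) start (by rw [pvBstep_length]; simp at hlen ⊢; omega)
    rw [this]
    rfl

-- every entry of a backward step is already reduced modulo m
theorem pvBW_mem (m : Int) (w : List Int) (c : Char) (x : Int) (hx : x ∈ pvBW m w c) :
    PySem.Int.mod x m = x := by
  unfold pvBW at hx
  split_ifs at hx
  · rw [List.mem_reverse] at hx
    exact pvScan_mem m _ _ _ hx
  · have := List.eq_of_mem_replicate hx
    rw [this, pvScan_snd0]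
    exact pvMod_mod _ _
  · exact pvScan_mem m _ _ _ hx

-- port B's fold equals the pvBW spine
theorem pvAltSpine (s : String) (m : Int) (h : s.toList ≠ []) :
    countRestrictedPermutationString_alt s m
      = PySem.List.pyGetD (pvV m (List.replicate (s.toList.length + 1) 1) s.toList) 0 0 := by
  simp only [countRestrictedPermutationString_alt]
  rw [if_neg (by simpa [List.isEmpty_iff] using h)]
  congr 1
  have hbody : (fun (w : List Int) (c : Char) =>
      if c = '<' then
        (((PySem.List.slice w (some 1) none).reverse).foldl
          (fun (pa : List Int × Int) x =>
            (pa.1 ++ [PySem.Int.mod (pa.2 + x) m], PySem.Int.mod (pa.2 + x) m))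
          ([], 0)).1.reverse
      else if c = '=' then
        List.replicate (w.length - 1) (w.foldl (fun t x => PySem.Int.mod (t + x) m) 0)
      else
        ((PySem.List.slice w none (some (-1))).foldl
          (fun (pa : List Int × Int) x =>
            (pa.1 ++ [PySem.Int.mod (pa.2 + x) m], PySem.Int.mod (pa.2 + x) m))
          ([], 0)).1) = fun w c => pvBW m w c := by
    funext w c
    unfold pvBW
    split_ifs
    · rw [PySem.List.slice_from_one, pvScan_foldl]
      simp
    · rw [pvFoldl_scan]
    · rw [PySem.List.slice_to_neg_one, pvScan_foldl]
      simp
  rw [hbody, List.foldl_reverse]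
  rfl

-- ===== VERDICT (by name: the statement is the Claim_ definition above) =====
theorem countRestrictedPermutationString_spec : Claim_equal_countRestrictedPermutationString := by
  intro s m _ _
  unfold Spec_countRestrictedPermutationString
  by_cases h : s.toList = []
  · have hlen0 : PySem.Str.len s = 0 := by rw [PySem.Str.len_eq, h]; rfl
    simp only [countRestrictedPermutationString, countRestrictedPermutationString_alt,
      countRestrictedPermutation, hlen0, h]
    rw [PySem.List.pyRange_one_eq_nil (le_refl 0)]
    simp
    rfl
  · rw [pvA_eq s m h, pvAltSpine s m h]
    set cs := s.toList with hcs
    set start : List Int := List.replicate (cs.length + 1) 1 with hstart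
    have hlenV : (pvV m start cs).length = 1 := by
      rw [pvV_length]
      simp [hstart]
    obtain ⟨h0, hV⟩ := List.length_eq_one_iff.mp hlenV
    have hred : PySem.Int.mod h0 m = h0 := by
      obtain ⟨c, rest, hcr⟩ := List.exists_cons_of_ne_nil h
      have hmem : h0 ∈ pvV m start cs := by
        rw [hV]; exact List.mem_singleton_self h0
      rw [hcr, pvV_cons] at hmem
      exact pvBW_mem m _ c h0 hmem
    have hkey := pvKey m cs [1] start (by simp [hstart]; omega)
    rw [hV] at hkey
    have hdot1 : pvDot [h0] [1] = h0 := by simp [pvDot]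
    rw [hdot1, hred] at hkey
    have hfold : cs.foldl (pvBstep m) [1] = pvR m cs cs.length := by
      unfold pvR
      rw [List.take_length]
    rw [hfold] at hkey
    have hRlen := pvR_length m cs cs.length (le_refl _)
    have hones : pvDot start (pvR m cs cs.length) = (pvR m cs cs.length).sum := by
      rw [hstart, show cs.length + 1 = (pvR m cs cs.length).length from hRlen.symm,
        pvDot_repl_left]
      ring
    rw [hones] at hkey
    rw [← hkey]
    have hget : PySem.List.pyGetD (pvV m start cs) 0 0 = h0 := by
      rw [hV]
      rfl
    rw [hget]
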